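-- pv_equiv track=rewrite | github.com/daniel-reich/ubiquitous-fiesta | di7ZjxgvLgz72PvCS_11.py | validate_swaps
-- ===== SOURCE A (Python) =====
-- def validate_swaps(lst, txt):
--   result = []
--   for i in lst:
--     if sorted(i) == sorted(txt):
--       diff = 0
--       for j in range(len(i)):
--         if i[j] != txt[j]:
--           diff += 1
--       if diff == 2: result.append(True)
--       else: result.append(False)
--     else: result.append(False)
--   return result
-- ===== SOURCE B (Python) =====
-- def validate_swaps(lst, txt):
--   # Faster: instead of sorting each string and recounting, check length and
--   # validate the single transposition directly from the mismatched pairs.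
--   result = []
--   for s in lst:
--     if len(s) != len(txt):
--       result.append(False)
--     else:
--       diffs = [(a, b) for a, b in zip(s, txt) if a != b]
--       result.append(len(diffs) == 2 and diffs[0] == diffs[1][::-1])
--   return result
-- ===== Notes on version B (the rewrite author's own statement) =====
-- stated objective: faster
-- what changed: Replaces the sort-both-strings anagram test plus separate index-loop diff count with a single zip pass collecting mismatched character pairs and checking they form one transposition.
import Mathlib
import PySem

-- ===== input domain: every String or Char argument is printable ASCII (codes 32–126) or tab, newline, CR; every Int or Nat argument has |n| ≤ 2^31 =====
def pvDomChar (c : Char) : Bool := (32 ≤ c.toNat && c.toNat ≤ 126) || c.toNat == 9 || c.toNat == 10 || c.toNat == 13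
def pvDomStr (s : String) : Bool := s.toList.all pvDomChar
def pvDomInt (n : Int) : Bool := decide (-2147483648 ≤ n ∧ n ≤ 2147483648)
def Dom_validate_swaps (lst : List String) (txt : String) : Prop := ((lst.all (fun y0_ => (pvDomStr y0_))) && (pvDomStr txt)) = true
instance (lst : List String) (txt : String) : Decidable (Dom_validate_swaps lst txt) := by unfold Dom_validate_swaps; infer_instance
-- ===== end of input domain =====

-- B replaces A's sort-both-strings anagram test + index-loop diff count by one zip pass
-- validating the single transposition directly, removing the per-string sorting (objective: faster, measured).

-- ===== PORT A =====
def pvAElem (i txt : String) : Bool :=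
  if PySem.List.sorted i.toList (fun c => c) false = PySem.List.sorted txt.toList (fun c => c) false then
    let diff : Int := (PySem.List.pyRange 0 (i.toList.length : Int) 1).foldl
      (fun d j => if PySem.List.pyGet? i.toList j ≠ PySem.List.pyGet? txt.toList j then d + 1 else d) 0
    if diff = 2 then true else false
  else false

def validate_swaps (lst : List String) (txt : String) : List Bool :=
  lst.foldl (fun result i => result ++ [pvAElem i txt]) []

-- ===== PORT B =====
def pvBElem (s txt : String) : Bool :=
  if s.toList.length ≠ txt.toList.length then false
  else
    match (s.toList.zip txt.toList).filter (fun p => p.1 ≠ p.2) with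
    | [(a, b), (c, d)] => decide (a = d ∧ b = c)   -- diffs[0] == diffs[1][::-1]
    | _ => false

def validate_swaps_alt (lst : List String) (txt : String) : List Bool :=
  lst.foldl (fun result s => result ++ [pvBElem s txt]) []

-- ===== PRECONDITION & SPEC =====
def Spec_validate_swaps (lst : List String) (txt : String) (out : List Bool) : Prop := out = validate_swaps_alt lst txt
instance (lst : List String) (txt : String) (out : List Bool) : Decidable (Spec_validate_swaps lst txt out) := by unfold Spec_validate_swaps; infer_instance

-- ===== CLAIM (what is proved, stated in full; the proofs are below) =====
def Claim_equal_validate_swaps : Prop := ∀ (lst : List String) (txt : String), Dom_validate_swaps lst txt → Spec_validate_swaps lst txt (validate_swaps lst txt)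

-- ===== LEMMAS AND PROOFS =====

-- A's index-based diff count equals the number of mismatched zip pairs (equal lengths).
theorem pv_count_eq (s t : List Char) (h : s.length = t.length) :
    (List.range s.length).countP (fun k => decide (s[k]? ≠ t[k]?))
      = (s.zip t).countP (fun p => decide (p.1 ≠ p.2)) := by
  induction s generalizing t with
  | nil => simp
  | cons a s ih =>
    cases t with
    | nil => simp at h
    | cons b t =>
      have h' : s.length = t.length := by simpa using h
      simp [List.range_succ_eq_map, List.countP_cons, List.countP_map, Function.comp_def]
      simpa using ih t h'

-- [a,c] ~ [b,d] with a≠b, c≠d forces the transposition a=d ∧ c=b.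
theorem pv_pair_perm_iff (a b c d : Char) (hab : a ≠ b) (hcd : c ≠ d) :
    [a, c].Perm [b, d] ↔ (a = d ∧ c = b) := by
  constructor
  · intro h
    have ha : a ∈ [b, d] := h.mem_iff.mp (by simp)
    simp only [List.mem_cons, List.not_mem_nil, or_false] at ha
    rcases ha with ha | ha
    · exact absurd ha hab
    · subst ha
      have hb : b ∈ [a, c] := h.mem_iff.mpr (by simp)
      simp only [List.mem_cons, List.not_mem_nil, or_false] at hb
      rcases hb with hb | hb
      · exact absurd hb.symm hab
      · exact ⟨rfl, hb.symm⟩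
  · rintro ⟨rfl, rfl⟩
    exact List.Perm.swap _ _ _

-- s ~ t iff the mismatched components of the zip are permutations of each other.
theorem pv_perm_iff_filter (z : List (Char × Char)) :
    (z.map Prod.fst).Perm (z.map Prod.snd) ↔
      ((z.filter (fun p => decide (p.1 ≠ p.2))).map Prod.fst).Perm
        ((z.filter (fun p => decide (p.1 ≠ p.2))).map Prod.snd) := by
  have hsplit : (z.filter (fun p => decide (p.1 = p.2)) ++
      z.filter (fun p => !decide (p.1 = p.2))).Perm z := List.filter_append_perm _ z
  have hne : (fun p : Char × Char => !decide (p.1 = p.2)) = (fun p => decide (p.1 ≠ p.2)) := by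
    funext p; simp [decide_not]
  rw [hne] at hsplit
  have heq : (z.filter (fun p => decide (p.1 = p.2))).map Prod.fst
      = (z.filter (fun p => decide (p.1 = p.2))).map Prod.snd := by
    apply List.map_congr_left
    intro p hp
    have := List.of_mem_filter hp
    simpa using this
  constructor
  · intro h
    have h1 : ((z.filter (fun p => decide (p.1 = p.2)) ++
        z.filter (fun p => decide (p.1 ≠ p.2))).map Prod.fst).Perm
        ((z.filter (fun p => decide (p.1 = p.2)) ++
        z.filter (fun p => decide (p.1 ≠ p.2))).map Prod.snd) :=
      ((hsplit.map Prod.fst).trans h).trans (hsplit.map Prod.snd).symm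
    simp only [List.map_append, heq] at h1
    exact (List.perm_append_left_iff _).mp h1
  · intro h
    have h2 : ((z.filter (fun p => decide (p.1 = p.2)) ++
        z.filter (fun p => decide (p.1 ≠ p.2))).map Prod.fst).Perm
        ((z.filter (fun p => decide (p.1 = p.2)) ++
        z.filter (fun p => decide (p.1 ≠ p.2))).map Prod.snd) := by
      simp only [List.map_append, heq]
      exact h.append_left _
    exact ((hsplit.map Prod.fst).symm.trans h2).trans (hsplit.map Prod.snd)

theorem pv_elem_eq (s txt : String) : pvAElem s txt = pvBElem s txt := by
  by_cases hlen : s.toList.length = txt.toList.length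
  · have hzfst : (s.toList.zip txt.toList).map Prod.fst = s.toList :=
      List.map_fst_zip (le_of_eq hlen)
    have hzsnd : (s.toList.zip txt.toList).map Prod.snd = txt.toList :=
      List.map_snd_zip (le_of_eq hlen.symm)
    have hperm : (PySem.List.sorted s.toList (fun c => c) false
          = PySem.List.sorted txt.toList (fun c => c) false)
        ↔ (((s.toList.zip txt.toList).filter (fun p => p.1 ≠ p.2)).map Prod.fst).Perm
            (((s.toList.zip txt.toList).filter (fun p => p.1 ≠ p.2)).map Prod.snd) := by
      rw [PySem.List.sorted_id_eq_sorted_id_iff_perm]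
      have h0 := pv_perm_iff_filter (s.toList.zip txt.toList)
      rw [hzfst, hzsnd] at h0
      exact h0
    have hcount : (PySem.List.pyRange 0 (s.toList.length : Int) 1).foldl
        (fun d j => if PySem.List.pyGet? s.toList j ≠ PySem.List.pyGet? txt.toList j
          then d + 1 else d) (0 : Int)
        = (((s.toList.zip txt.toList).filter (fun p => p.1 ≠ p.2)).length : Int) := by
      rw [PySem.List.foldl_ite_add_one]
      rw [← List.countP_eq_length_filter, PySem.List.pyRange_zero_natCast]
      have hc2 : (List.range s.toList.length).countP (fun k =>
            decide (s.toList[k]? ≠ txt.toList[k]?))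
          = (s.toList.zip txt.toList).countP (fun p => decide (p.1 ≠ p.2)) :=
        pv_count_eq s.toList txt.toList hlen
      simp only [List.countP_map, Function.comp_def]
      simp only [PySem.List.pyGet?_natCast]
      simp at hc2 ⊢
      omega
    rcases hF : (s.toList.zip txt.toList).filter (fun p => p.1 ≠ p.2) with
      _ | ⟨⟨a, b⟩, _ | ⟨⟨c, d⟩, _ | ⟨x, rest⟩⟩⟩
    · simp only [pvAElem, pvBElem, hcount, hF]
      simp [hlen]
    · simp only [pvAElem, pvBElem, hcount, hF]
      simp [hlen]
    · -- exactly two mismatched positions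
      have hmab : (a, b) ∈ (s.toList.zip txt.toList).filter (fun p => p.1 ≠ p.2) := by
        rw [hF]; exact List.mem_cons_self ..
      have hmcd : (c, d) ∈ (s.toList.zip txt.toList).filter (fun p => p.1 ≠ p.2) := by
        rw [hF]; exact List.mem_cons_of_mem _ (List.mem_cons_self ..)
      have hab : a ≠ b := by simpa using (List.mem_filter.mp hmab).2
      have hcd : c ≠ d := by simpa using (List.mem_filter.mp hmcd).2
      rw [hF] at hperm
      simp only [List.map_cons, List.map_nil] at hperm
      have hperm2 : (PySem.List.sorted s.toList (fun c => c) false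
            = PySem.List.sorted txt.toList (fun c => c) false) ↔ (a = d ∧ c = b) :=
        hperm.trans (pv_pair_perm_iff a b c d hab hcd)
      simp only [pvAElem, pvBElem, hcount, hF]
      by_cases hp : (PySem.List.sorted s.toList (fun c => c) false
          = PySem.List.sorted txt.toList (fun c => c) false)
      · obtain ⟨h1, h2⟩ := hperm2.mp hp
        simp [hp, hlen, h1, h2]
      · have hno : ¬ (a = d ∧ b = c) := by
          intro ⟨h1, h2⟩; exact hp (hperm2.mpr ⟨h1, h2.symm⟩)
        simp [hp, hlen, hno]
    · simp only [pvAElem, pvBElem, hcount, hF]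
      have hne : ¬ ((((((a, b) :: (c, d) :: x :: rest).length : Nat)) : Int) = 2) := by
        simp only [List.length_cons]
        push_cast
        omega
      simp [hlen]
      intro _
      omega
  · have hs : ¬ (PySem.List.sorted s.toList (fun c => c) false
        = PySem.List.sorted txt.toList (fun c => c) false) := by
      intro h
      exact hlen (List.Perm.length_eq ((PySem.List.sorted_id_eq_sorted_id_iff_perm _ _).mp h))
    have hlen' : ¬ s.length = txt.length := by simpa using hlen
    simp [pvAElem, pvBElem, hs, hlen']

theorem pv_fold_map_A (lst : List String) (txt : String) :
    validate_swaps lst txt = lst.map (fun i => pvAElem i txt) := by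
  unfold validate_swaps
  simpa using PySem.List.foldl_append_singleton_eq_map (l := lst) (f := fun i => pvAElem i txt) (acc := [])

theorem pv_fold_map_B (lst : List String) (txt : String) :
    validate_swaps_alt lst txt = lst.map (fun s => pvBElem s txt) := by
  unfold validate_swaps_alt
  simpa using PySem.List.foldl_append_singleton_eq_map (l := lst) (f := fun s => pvBElem s txt) (acc := [])

-- ===== VERDICT (by name: the statement is the Claim_ definition above) =====
theorem validate_swaps_spec : Claim_equal_validate_swaps := by
  intro lst txt _
  unfold Spec_validate_swaps
  rw [pv_fold_map_A, pv_fold_map_B]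
  exact List.map_congr_left (fun s _ => pv_elem_eq s txt)
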